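-- pv_equiv track=rewrite | github.com/thehanemperor/LeetCode | String/736. Parse Lisp Expression.py | parse
-- ===== SOURCE A (Python) =====
-- def parse(expr):
--     ans = []
--     bal = 0
--     buf = []
--     for token in expr.split(" "):
--         for char in token:
--             if char == "(":
--                 bal+=1
--             if char == ")":
--                 bal -= 1
--         if len(buf)>0:
--             buf.append(" ")
--         buf.append(token)
--         if bal == 0:
--             ans.append(''.join(buf))
--             buf = []
--     if len(buf) > 0:
--         ans.append(''.join(buf))
--
--     return ans
-- ===== SOURCE B (Python) =====
-- def parse(expr):
--     ans = []
--     bal = 0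
--     buf = []
--     for ch in expr:
--         if ch == " " and bal == 0:
--             ans.append("".join(buf))
--             buf = []
--         else:
--             if ch == "(":
--                 bal += 1
--             elif ch == ")":
--                 bal -= 1
--             buf.append(ch)
--     ans.append("".join(buf))
--     return ans
-- ===== Notes on version B (the rewrite author's own statement) =====
-- stated objective: simpler
-- what changed: A tokenizes with expr.split(" "), re-counts parens per token and re-joins buffered tokens with spaces; B is one flat scan over the characters keeping an integer balance and a character buffer, emitting the buffer at each space seen at balance 0.
import Mathlib
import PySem

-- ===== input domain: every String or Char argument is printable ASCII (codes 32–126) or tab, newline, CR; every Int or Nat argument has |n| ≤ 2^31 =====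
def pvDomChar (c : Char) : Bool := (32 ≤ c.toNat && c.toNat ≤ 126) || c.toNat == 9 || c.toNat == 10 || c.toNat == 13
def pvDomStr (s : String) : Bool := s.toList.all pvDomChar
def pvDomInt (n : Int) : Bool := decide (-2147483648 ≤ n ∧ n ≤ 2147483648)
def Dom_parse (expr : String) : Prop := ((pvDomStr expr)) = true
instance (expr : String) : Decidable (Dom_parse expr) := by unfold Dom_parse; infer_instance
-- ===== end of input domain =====

-- B replaces A's tokenize-with-split(" ")-then-rejoin double loop by one flat character scan
-- maintaining a paren balance and a buffer (objective: simpler decomposition).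

-- ===== PORT A =====
-- inner 'for char in token' loop body of A, updating bal
def parseBalStep (b : Int) (c : Char) : Int :=
  let b := if c = '(' then b + 1 else b
  if c = ')' then b - 1 else b

-- body of A's 'for token in expr.split(" ")' loop; state = (ans, bal, buf)
def parseStepA (st : List (List Char) × Int × List (List Char)) (token : List Char) :
    List (List Char) × Int × List (List Char) :=
  let bal := token.foldl parseBalStep st.2.1
  let buf := if PySem.List.len st.2.2 > 0 then st.2.2 ++ [[' ']] else st.2.2
  let buf := buf ++ [token]
  if bal = 0 then (st.1 ++ [PySem.Chars.join [] buf], bal, []) else (st.1, bal, buf)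

def parse (expr : String) : List String :=
  let st := (PySem.Chars.splitOn expr.toList " ".toList).foldl parseStepA ([], 0, [])
  let ans := if PySem.List.len st.2.2 > 0 then st.1 ++ [PySem.Chars.join [] st.2.2] else st.1
  ans.map String.ofList

-- ===== PORT B =====
-- body of B's single 'for ch in expr' loop; state = (ans, bal, buf)
def parseStepB (st : List (List Char) × Int × List Char) (ch : Char) :
    List (List Char) × Int × List Char :=
  if ch = ' ' ∧ st.2.1 = 0 then (st.1 ++ [st.2.2], st.2.1, [])
  else
    let bal := if ch = '(' then st.2.1 + 1 else if ch = ')' then st.2.1 - 1 else st.2.1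
    (st.1, bal, st.2.2 ++ [ch])

def parse_alt (expr : String) : List String :=
  let st := expr.toList.foldl parseStepB ([], 0, [])
  (st.1 ++ [st.2.2]).map String.ofList

-- ===== PRECONDITION & SPEC =====
def Spec_parse (expr : String) (out : List String) : Prop := out = parse_alt expr
instance (expr : String) (out : List String) : Decidable (Spec_parse expr out) := by unfold Spec_parse; infer_instance

-- ===== CLAIM (what is proved, stated in full; the proofs are below) =====
def Claim_equal_parse : Prop := ∀ (expr : String), Dom_parse expr → Spec_parse expr (parse expr)

-- ===== LEMMAS AND PROOFS =====

-- reference splitter: (first token, remaining tokens) of splitting on ' '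
def msp : List Char → List Char × List (List Char)
  | [] => ([], [])
  | c :: r => if c = ' ' then ([], (msp r).1 :: (msp r).2) else (c :: (msp r).1, (msp r).2)

-- reference result: remaining chars, balance, current buffer ↦ emitted groups (B's shape)
def refF : List Char → Int → List Char → List (List Char)
  | [], _, buf => [buf]
  | c :: r, bal, buf =>
      if c = ' ' ∧ bal = 0 then buf :: refF r bal []
      else refF r (if c = '(' then bal + 1 else if c = ')' then bal - 1 else bal) (buf ++ [c])

-- flattened text separating A's pending buffer from the next token
def sepOf (buf : List (List Char)) : List Char :=
  if buf = [] then [] else buf.flatten ++ [' ']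

-- A's final 'if len(buf) > 0: ans.append(...)'
def afin (st : List (List Char) × Int × List (List Char)) : List (List Char) :=
  if PySem.List.len st.2.2 > 0 then st.1 ++ [PySem.Chars.join [] st.2.2] else st.1

theorem intersperse_nil_flatten (ps : List (List Char)) :
    (List.intersperse ([] : List Char) ps).flatten = ps.flatten := by
  induction ps with
  | nil => simp
  | cons a t ih =>
      cases t with
      | nil => simp
      | cons b t2 => simp only [List.intersperse_cons₂, List.flatten_cons] at *; simp [ih]

theorem join_nil_eq_flatten (ps : List (List Char)) : PySem.Chars.join [] ps = ps.flatten := by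
  simp [PySem.Chars.join, List.intercalate, intersperse_nil_flatten]

theorem go_spec (l : List Char) : ∀ (fuel : Nat) (cur : List Char) (acc : List (List Char)),
    l.length < fuel →
    PySem.Chars.splitOn.go [' '] fuel l cur acc =
      acc.reverse ++ (cur.reverse ++ (msp l).1) :: (msp l).2 := by
  induction l with
  | nil =>
      intro fuel cur acc h
      match fuel, h with
      | fuel + 1, _ =>
        rw [PySem.Chars.splitOn.go]
        simp [msp]
        omega
  | cons c rest ih =>
      intro fuel cur acc h
      match fuel, h with
      | fuel + 1, h =>
        rw [PySem.Chars.splitOn.go]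
        by_cases hc : c = ' '
        · subst hc
          simp only [List.isPrefixOf, BEq.rfl, Bool.true_and, if_pos, List.length_cons, List.length_nil, List.drop_succ_cons, List.drop_zero]
          rw [ih fuel [] (cur.reverse :: acc) (by simp at h; omega)]
          simp [msp]
        · have hpre : [' '].isPrefixOf (c :: rest) = false := by
            simp [List.isPrefixOf]
            exact fun hh => absurd hh.symm hc
          rw [hpre]
          simp only [Bool.false_eq_true, if_false]
          rw [ih fuel (c :: cur) acc (by simp at h; omega)]
          simp [msp, hc]

theorem splitOn_eq_msp (cs : List Char) :
    PySem.Chars.splitOn cs [' '] = (msp cs).1 :: (msp cs).2 := by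
  unfold PySem.Chars.splitOn
  rw [go_spec cs (cs.length + 1) [] [] (by omega)]
  simp

-- A's fold over the tokens, entered mid-token with prefix p already scanned, equals refF
theorem afold_eq_refF (cs : List Char) : ∀ (p : List Char) (ans : List (List Char)) (bal : Int)
    (buf : List (List Char)),
    afin (List.foldl parseStepA (ans, bal, buf) ((p ++ (msp cs).1) :: (msp cs).2))
      = ans ++ refF cs (p.foldl parseBalStep bal) (sepOf buf ++ p) := by
  induction cs with
  | nil =>
      intro p ans bal buf
      simp only [msp, List.append_nil, List.foldl_cons, List.foldl_nil]
      by_cases h0 : buf = []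
      · subst h0
        by_cases hb : List.foldl parseBalStep bal p = 0 <;>
          simp [parseStepA, afin, hb, refF, sepOf, PySem.List.len_eq]
      · have hl : 0 < buf.length := List.length_pos_iff.mpr h0
        by_cases hb : List.foldl parseBalStep bal p = 0 <;>
          · simp [parseStepA, afin, hb, refF, join_nil_eq_flatten, sepOf, PySem.List.len_eq, hl, h0]
            try omega
  | cons c r ih =>
      intro p ans bal buf
      have key : ∀ (a : List (List Char)) (b : Int) (u : List (List Char)),
          afin (List.foldl parseStepA (a, b, u) ((msp r).1 :: (msp r).2))
            = a ++ refF r b (sepOf u) := by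
        intro a b u
        have H := ih [] a b u
        simpa using H
      by_cases hc : c = ' '
      · subst hc
        have hm : ((p ++ (msp (' ' :: r)).1) :: (msp (' ' :: r)).2)
            = p :: (msp r).1 :: (msp r).2 := by simp [msp]
        rw [hm, List.foldl_cons]
        by_cases hb : List.foldl parseBalStep bal p = 0
        · rw [show parseStepA (ans, bal, buf) p
              = (ans ++ [PySem.Chars.join []
                  ((if PySem.List.len buf > 0 then buf ++ [[' ']] else buf) ++ [p])],
                 List.foldl parseBalStep bal p, []) from by simp [parseStepA, hb]]
          rw [key]
          by_cases h0 : buf = []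
          · subst h0
            simp [refF, hb, sepOf, PySem.List.len_eq]
          · have hl : 0 < buf.length := List.length_pos_iff.mpr h0
            simp [refF, hb, sepOf, join_nil_eq_flatten, PySem.List.len_eq, hl, h0]
        · rw [show parseStepA (ans, bal, buf) p
              = (ans, List.foldl parseBalStep bal p,
                 (if PySem.List.len buf > 0 then buf ++ [[' ']] else buf) ++ [p]) from by
            simp [parseStepA, hb]]
          rw [key]
          by_cases h0 : buf = []
          · subst h0
            simp [refF, hb, sepOf, PySem.List.len_eq]
          · have hl : 0 < buf.length := List.length_pos_iff.mpr h0
            simp [refF, hb, sepOf, PySem.List.len_eq, hl, h0]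
      · have hm : ((p ++ (msp (c :: r)).1) :: (msp (c :: r)).2)
            = ((p ++ [c]) ++ (msp r).1) :: (msp r).2 := by simp [msp, hc]
        rw [hm, ih (p ++ [c])]
        have hbal : (p ++ [c]).foldl parseBalStep bal
            = if c = '(' then p.foldl parseBalStep bal + 1
              else if c = ')' then p.foldl parseBalStep bal - 1
              else p.foldl parseBalStep bal := by
          simp only [List.foldl_append, List.foldl_cons, List.foldl_nil, parseBalStep]
          split_ifs <;> simp_all
        simp [refF, hc, hbal, List.append_assoc]

-- B's fold equals refF
theorem bfold_eq_refF (cs : List Char) : ∀ (st : List (List Char) × Int × List Char),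
    (List.foldl parseStepB st cs).1 ++ [(List.foldl parseStepB st cs).2.2]
      = st.1 ++ refF cs st.2.1 st.2.2 := by
  induction cs with
  | nil => intro st; simp [refF]
  | cons c r ih =>
      intro st
      rw [List.foldl_cons]
      by_cases h : c = ' ' ∧ st.2.1 = 0
      · rw [show parseStepB st c = (st.1 ++ [st.2.2], st.2.1, []) from by simp [parseStepB, h]]
        rw [ih]
        simp [refF, h.1, h.2]
      · rw [show parseStepB st c
            = (st.1, if c = '(' then st.2.1 + 1 else if c = ')' then st.2.1 - 1 else st.2.1,
               st.2.2 ++ [c]) from by simp [parseStepB, h]]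
        rw [ih]
        simp only [refF, h]
        simp

-- ===== VERDICT (by name: the statement is the Claim_ definition above) =====
theorem parse_spec : Claim_equal_parse := by
  intro expr _
  unfold Spec_parse parse parse_alt
  rw [show " ".toList = [' '] from rfl, splitOn_eq_msp]
  show (afin (List.foldl parseStepA ([], 0, []) ((msp expr.toList).1 :: (msp expr.toList).2))).map
      String.ofList
    = ((List.foldl parseStepB ([], 0, []) expr.toList).1
        ++ [(List.foldl parseStepB ([], 0, []) expr.toList).2.2]).map String.ofList
  have ha := afold_eq_refF expr.toList [] [] 0 []
  simp only [List.nil_append, List.foldl_nil] at ha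
  have hb := bfold_eq_refF expr.toList ([], 0, [])
  simp only [List.nil_append] at hb
  rw [ha, hb]
  simp [sepOf]
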